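-- pv_equiv track=rewrite | github.com/researchstudio-sat/wonpreprocessing | python-processing/src/main/python/mail_utils.py | mail_preprocessor
-- ===== SOURCE A (Python) =====
-- def mail_preprocessor(doc):
--     """Return only the Subject and Content parts from the mail."""
--     accept = False
--     accepted_lines = []
--     for line in doc.splitlines():
--         l = line.lower()
--         if l.startswith('subject'):
--             accept = True
--             line = line.lstrip('subject')
--         elif l.startswith('content'):
--             accept = True
--             line = line.lstrip('content')
--         if accept:
--             accepted_lines.append(line.strip())
--     return '\n'.join(accepted_lines)
-- ===== SOURCE B (Python) =====
-- def _clean(line):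
--     l = line.lower()
--     if l.startswith('subject'):
--         return line.lstrip('subject').strip()
--     if l.startswith('content'):
--         return line.lstrip('content').strip()
--     return line.strip()
--
--
-- def mail_preprocessor(doc):
--     """Return only the Subject and Content parts from the mail."""
--     lines = doc.splitlines()
--     start = next((i for i, l in enumerate(lines)
--                   if l.lower().startswith(('subject', 'content'))), None)
--     if start is None:
--         return ''
--     return '\n'.join(_clean(l) for l in lines[start:])
-- ===== Notes on version B (the rewrite author's own statement) =====
-- stated objective: simpler
-- what changed: Replaces the latched accept-flag fold with a two-phase decomposition: locate the first subject/content line once, then map a stateless per-line cleaner over the suffix and join.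
import Mathlib
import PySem

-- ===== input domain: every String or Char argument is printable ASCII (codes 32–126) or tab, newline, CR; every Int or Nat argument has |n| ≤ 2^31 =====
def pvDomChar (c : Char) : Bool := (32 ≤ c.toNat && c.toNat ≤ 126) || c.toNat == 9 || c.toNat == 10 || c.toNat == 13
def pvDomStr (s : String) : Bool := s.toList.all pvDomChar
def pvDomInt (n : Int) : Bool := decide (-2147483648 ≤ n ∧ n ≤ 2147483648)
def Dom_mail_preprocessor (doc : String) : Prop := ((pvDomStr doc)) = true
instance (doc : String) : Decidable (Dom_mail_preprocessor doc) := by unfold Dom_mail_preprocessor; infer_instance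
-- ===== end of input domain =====

-- B is a simpler decomposition: locate the first subject/content line once, then map a
-- stateless cleaner over the suffix; no latched accept flag. Return values proved equal.

-- ===== PORT A =====
-- line.lstrip(chars): PySem has no lstrip-with-chars primitive; ported by hand as
-- dropWhile (membership in the char set), which is exactly Python's str.lstrip(chars).
def pvLstripSet (chars : List Char) (s : List Char) : List Char :=
  s.dropWhile (fun c => c ∈ chars)

-- one iteration of A's loop over (accept, accepted_lines)
def pvStepA (st : Bool × List (List Char)) (line : List Char) : Bool × List (List Char) :=
  let l := PySem.Chars.lower line
  let (accept, line') :=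
    if PySem.Chars.startswith l "subject".toList then
      (true, pvLstripSet "subject".toList line)
    else if PySem.Chars.startswith l "content".toList then
      (true, pvLstripSet "content".toList line)
    else (st.1, line)
  if accept then (accept, st.2 ++ [PySem.Chars.strip line']) else (accept, st.2)

def mail_preprocessor (doc : String) : String :=
  let r := (PySem.Chars.splitlines doc.toList).foldl pvStepA (false, [])
  String.mk (PySem.Chars.join ['\n'] r.2)

-- ===== PORT B =====
def pvIsHeader (line : List Char) : Bool :=
  let l := PySem.Chars.lower line
  PySem.Chars.startswith l "subject".toList || PySem.Chars.startswith l "content".toList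

def pvClean (line : List Char) : List Char :=
  let l := PySem.Chars.lower line
  if PySem.Chars.startswith l "subject".toList then
    PySem.Chars.strip (pvLstripSet "subject".toList line)
  else if PySem.Chars.startswith l "content".toList then
    PySem.Chars.strip (pvLstripSet "content".toList line)
  else PySem.Chars.strip line

def mail_preprocessor_alt (doc : String) : String :=
  let lines := PySem.Chars.splitlines doc.toList
  match lines.findIdx? pvIsHeader with
  | none => ""
  | some start => String.mk (PySem.Chars.join ['\n'] ((lines.drop start).map pvClean))

-- ===== PRECONDITION & SPEC =====
def Spec_mail_preprocessor (doc : String) (out : String) : Prop := out = mail_preprocessor_alt doc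
instance (doc : String) (out : String) : Decidable (Spec_mail_preprocessor doc out) := by unfold Spec_mail_preprocessor; infer_instance

-- ===== CLAIM (what is proved, stated in full; the proofs are below) =====
def Claim_equal_mail_preprocessor : Prop := ∀ (doc : String), Dom_mail_preprocessor doc → Spec_mail_preprocessor doc (mail_preprocessor doc)

-- ===== LEMMAS AND PROOFS =====

-- one step of A's loop with accept already latched appends pvClean of the line
theorem pv_step_true (acc : List (List Char)) (l : List Char) :
    pvStepA (true, acc) l = (true, acc ++ [pvClean l]) := by
  simp only [pvStepA, pvClean]
  split_ifs <;> simp_all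

-- once accept has latched, A appends pvClean of every remaining line
theorem pv_foldl_true (lines : List (List Char)) (acc : List (List Char)) :
    lines.foldl pvStepA (true, acc) = (true, acc ++ lines.map pvClean) := by
  induction lines generalizing acc with
  | nil => simp
  | cons l ls ih => simp [List.foldl_cons, pv_step_true, ih]

-- before accept latches, A skips lines until the first header line
theorem pv_foldl_false (lines : List (List Char)) :
    lines.foldl pvStepA (false, []) =
      match lines.findIdx? pvIsHeader with
      | none => (false, [])
      | some i => (true, (lines.drop i).map pvClean) := by
  induction lines with
  | nil => simp
  | cons l ls ih =>
    by_cases h : pvIsHeader l = true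
    · have hstep : pvStepA (false, []) l = (true, [pvClean l]) := by
        simp only [pvIsHeader, Bool.or_eq_true] at h
        simp only [pvStepA, pvClean]
        split_ifs <;> simp_all
      simp [List.foldl_cons, hstep, pv_foldl_true, List.findIdx?_cons, h]
    · have hb := h
      simp only [pvIsHeader, Bool.or_eq_true, not_or] at hb
      have hstep : pvStepA (false, []) l = (false, []) := by
        simp only [pvStepA]
        split_ifs <;> simp_all
      rw [List.foldl_cons, hstep, ih, List.findIdx?_cons, if_neg (by simp [h])]
      cases hf : ls.findIdx? pvIsHeader <;> simp

-- ===== VERDICT (by name: the statement is the Claim_ definition above) =====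
theorem mail_preprocessor_spec : Claim_equal_mail_preprocessor := by
  intro doc _
  unfold Spec_mail_preprocessor mail_preprocessor mail_preprocessor_alt
  rw [pv_foldl_false]
  cases hf : (PySem.Chars.splitlines doc.toList).findIdx? pvIsHeader <;>
    simp [hf] <;> rfl
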